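-- pv_equiv track=rewrite | github.com/doGregor/SBD-SCD-pipeline | system_pipeline/speaker_change_detection.py | align_sentences_with_sc_tags
-- ===== SOURCE A (Python) =====
-- def align_sentences_with_sc_tags(labeled_output_tuples):
--     """
--     Aligns predicted speaker change labels with sentences.
--     :param labeled_output_tuples: list of POS-tagged tuples
--     :return: list of tuples where tuple[0] is list of sentence tokens and
--              tuple[1] is boolean speaker change label
--     """
--     sentence_list = []
--     sentence = []
--     sc_label = True
--     for idx, prediction in enumerate(labeled_output_tuples):
--         sentence.append(prediction[0])
--         if prediction[0] == '.':
--             if idx < len(labeled_output_tuples)-1: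
--                 sentence_list.append((sentence, sc_label))
--                 sentence = []
--                 if labeled_output_tuples[idx+1][1] == "SC":
--                     sc_label = True
--                 else:
--                     sc_label = False
--             else:
--                 sentence_list.append((sentence, sc_label))
--     return sentence_list
-- ===== SOURCE B (Python) =====
-- def align_sentences_with_sc_tags(labeled_output_tuples):
--     """Segment-splitting rewrite: repeatedly find the next '.' token, emit that
--     slice as a sentence; label is True for the first sentence, else whether the
--     segment's first token is tagged "SC". Trailing tokens after the last '.' drop out."""
--     out = []
--     rest = labeled_output_tuples
--     first = True
--     while True:
--         k = next((i for i, t in enumerate(rest) if t[0] == '.'), None)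
--         if k is None:
--             return out
--         label = True if first else (rest[0][1] == "SC")
--         out.append(([t[0] for t in rest[:k + 1]], label))
--         rest = rest[k + 1:]
--         first = False
-- ===== Notes on version B (the rewrite author's own statement) =====
-- stated objective: simpler
-- what changed: A's token-by-token state machine (running sentence buffer, carried sc_label, index lookahead) is replaced by repeatedly finding the next '.' token and emitting the slice up to it, with the label read off the segment's first token's tag.
import Mathlib
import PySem

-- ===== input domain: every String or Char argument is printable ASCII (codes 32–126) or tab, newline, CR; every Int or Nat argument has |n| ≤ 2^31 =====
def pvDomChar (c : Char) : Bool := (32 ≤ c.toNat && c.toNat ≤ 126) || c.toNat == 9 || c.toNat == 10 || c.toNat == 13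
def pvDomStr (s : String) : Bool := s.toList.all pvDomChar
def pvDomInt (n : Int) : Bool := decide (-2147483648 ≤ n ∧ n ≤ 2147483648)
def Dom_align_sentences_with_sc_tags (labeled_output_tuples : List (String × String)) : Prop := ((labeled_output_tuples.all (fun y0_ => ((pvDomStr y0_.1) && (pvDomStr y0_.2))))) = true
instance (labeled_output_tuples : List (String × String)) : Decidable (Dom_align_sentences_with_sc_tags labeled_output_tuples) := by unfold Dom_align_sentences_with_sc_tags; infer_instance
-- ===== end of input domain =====

-- B rewrites A's token-by-token state machine as repeated split-at-next-period; objective: simpler decomposition (return value only; neither mutates its argument).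

-- ===== PORT A =====
-- loop body of A, named so the invariant lemma can speak about it
def pvStepA (l : List (String × String))
    (st : List (List String × Bool) × List String × Bool)
    (ip : Int × (String × String)) : List (List String × Bool) × List String × Bool :=
  let sentence := st.2.1 ++ [ip.2.1]
  if ip.2.1 == "." then
    if ip.1 < (l.length : Int) - 1 then
      (st.1 ++ [(sentence, st.2.2)], [],
        if (PySem.List.pyGetD l (ip.1 + 1) ("", "")).2 == "SC" then true else false)
    else
      (st.1 ++ [(sentence, st.2.2)], sentence, st.2.2)
  else
    (st.1, sentence, st.2.2)

def align_sentences_with_sc_tags (labeled_output_tuples : List (String × String)) : List (List String × Bool) :=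
  ((PySem.List.enumerate labeled_output_tuples 0).foldl
      (pvStepA labeled_output_tuples) ([], [], true)).1

-- ===== PORT B =====
-- while-loop of B: find the next '.', emit the slice up to it, continue on the rest
def pvGoB (out : List (List String × Bool)) (rest : List (String × String)) (first : Bool) :
    List (List String × Bool) :=
  match h : rest.findIdx? (fun t => t.1 == ".") with
  | none => out
  | some k =>
      pvGoB
        (out ++ [((PySem.List.slice rest none (some ((k : Int) + 1))).map Prod.fst,
                  if first then true else (PySem.List.pyGetD rest 0 ("", "")).2 == "SC")])
        (PySem.List.slice rest (some ((k : Int) + 1)) none) false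
termination_by rest.length
decreasing_by
  have hk : k < rest.length := (List.findIdx?_eq_some_iff_findIdx_eq.mp h).1
  have hc : ((k : Int) + 1) = ((k + 1 : Nat) : Int) := by push_cast; ring
  rw [hc, PySem.List.slice_from_natCast]
  simp
  omega

def align_sentences_with_sc_tags_alt (labeled_output_tuples : List (String × String)) : List (List String × Bool) :=
  pvGoB [] labeled_output_tuples true

-- ===== PRECONDITION & SPEC =====
def Spec_align_sentences_with_sc_tags (labeled_output_tuples : List (String × String)) (out : List (List String × Bool)) : Prop := out = align_sentences_with_sc_tags_alt labeled_output_tuples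
instance (labeled_output_tuples : List (String × String)) (out : List (List String × Bool)) : Decidable (Spec_align_sentences_with_sc_tags labeled_output_tuples out) := by unfold Spec_align_sentences_with_sc_tags; infer_instance

-- ===== CLAIM (what is proved, stated in full; the proofs are below) =====
def Claim_equal_align_sentences_with_sc_tags : Prop := ∀ (labeled_output_tuples : List (String × String)), Dom_align_sentences_with_sc_tags labeled_output_tuples → Spec_align_sentences_with_sc_tags labeled_output_tuples (align_sentences_with_sc_tags labeled_output_tuples)

-- ===== LEMMAS AND PROOFS =====

-- common recursive description of the result: walk tokens, close a sentence at '.',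
-- next label comes from the tag of the token right after the period
def pvA : List (String × String) → List String → Bool → List (List String × Bool)
  | [], _, _ => []
  | t :: r, sent, lab =>
    if t.1 == "." then
      match r with
      | [] => [(sent ++ [t.1], lab)]
      | u :: r' => (sent ++ [t.1], lab) :: pvA (u :: r') [] (u.2 == "SC")
    else pvA r (sent ++ [t.1]) lab

theorem pvA_cons (t : String × String) (r : List (String × String)) (sent : List String) (lab : Bool) :
    pvA (t :: r) sent lab =
      if t.1 == "." then
        match r with
        | [] => [(sent ++ [t.1], lab)]
        | u :: r' => (sent ++ [t.1], lab) :: pvA (u :: r') [] (u.2 == "SC")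
      else pvA r (sent ++ [t.1]) lab := by
  rw [pvA.eq_def]

theorem pvA_inv (l : List (String × String)) :
    ∀ (r pre : List (String × String)) (acc : List (List String × Bool))
      (sent : List String) (lab : Bool), l = pre ++ r →
    ((PySem.List.enumerate r (pre.length : Int)).foldl (pvStepA l) (acc, sent, lab)).1
      = acc ++ pvA r sent lab := by
  intro r
  induction r with
  | nil => intro pre acc sent lab _; simp [PySem.List.enumerate, pvA]
  | cons t r' ih =>
    intro pre acc sent lab hl
    rw [PySem.List.enumerate_cons]
    simp only [List.foldl_cons]
    by_cases ht : (t.1 == ".") = true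
    · cases r' with
      | nil =>
        have hlen : l.length = pre.length + 1 := by rw [hl]; simp
        have hcond : ¬ ((pre.length : Int) < (l.length : Int) - 1) := by omega
        simp [pvStepA, ht, hcond, PySem.List.enumerate, pvA_cons]
      | cons u r'' =>
        have hlen : l.length = pre.length + 2 + r''.length := by rw [hl]; simp; omega
        have hcond : (pre.length : Int) < (l.length : Int) - 1 := by omega
        have hget : PySem.List.pyGetD l ((pre.length : Int) + 1) ("", "") = u := by
          have hc : ((pre.length : Int) + 1) = ((pre.length + 1 : Nat) : Int) := by push_cast; ring
          rw [hc, PySem.List.pyGetD_natCast, hl]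
          rw [List.getD_eq_getElem?_getD]
          rw [List.getElem?_append_right (by omega)]
          simp
        have hlab : (if (u.2 == "SC") = true then true else false) = (u.2 == "SC") := by
          cases h2 : u.2 == "SC" <;> simp
        simp only [pvStepA, ht, if_pos hcond, hget, if_true, hlab]
        have hcast : (pre.length : Int) + 1 = (((pre ++ [t]).length : Nat) : Int) := by simp
        rw [hcast, ih (pre ++ [t]) _ _ _ (by simp [hl])]
        conv_rhs => rw [pvA_cons]
        simp [ht]
    · have hcast : (pre.length : Int) + 1 = (((pre ++ [t]).length : Nat) : Int) := by simp
      simp only [pvStepA, ht, Bool.false_eq_true, if_false]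
      rw [hcast, ih (pre ++ [t]) _ _ _ (by simp [hl])]
      rw [pvA_cons]
      simp [ht]

-- pvA unfolded one whole sentence at a time (the shape pvGoB recurses in)
theorem pvA_split :
    ∀ (r : List (String × String)) (sent : List String) (lab : Bool),
    pvA r sent lab =
      match r.findIdx? (fun t => t.1 == ".") with
      | none => []
      | some k =>
          (sent ++ (r.take (k + 1)).map Prod.fst, lab) ::
            pvA (r.drop (k + 1)) [] (((r.drop (k + 1)).headD ("", "")).2 == "SC") := by
  intro r
  induction r with
  | nil => intro sent lab; simp [pvA]
  | cons t r' ih =>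
    intro sent lab
    rw [List.findIdx?_cons]
    by_cases ht : (t.1 == ".") = true
    · simp only [ht, if_true]
      cases r' with
      | nil => rw [pvA_cons]; simp [ht, pvA]
      | cons u r'' => rw [pvA_cons]; simp [ht]
    · simp only [ht, Bool.false_eq_true, if_false]
      rw [pvA_cons]
      simp only [ht, Bool.false_eq_true, if_false]
      rw [ih]
      cases h : r'.findIdx? (fun t => t.1 == ".") with
      | none => simp
      | some k => simp

theorem pvGoB_eq (rest : List (String × String)) :
    ∀ (out : List (List String × Bool)) (first : Bool),
    pvGoB out rest first
      = out ++ pvA rest []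
          (if first then true else ((rest.headD ("", "")).2 == "SC")) := by
  induction hn : rest.length using Nat.strong_induction_on generalizing rest with
  | _ n ih =>
    intro out first
    rw [pvGoB.eq_def]
    split
    · next h =>
      rw [pvA_split, h]; simp
    · next k h =>
      have hk : k < rest.length := (List.findIdx?_eq_some_iff_findIdx_eq.mp h).1
      have hcast : ((k : Int) + 1) = ((k + 1 : Nat) : Int) := by push_cast; ring
      rw [hcast, PySem.List.slice_to_natCast, PySem.List.slice_from_natCast]
      rw [ih (rest.drop (k + 1)).length (by simp; omega) _ rfl]
      rw [pvA_split rest, h]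
      have hhead : PySem.List.pyGetD rest 0 ("", "") = rest.headD ("", "") := by
        rw [PySem.List.pyGetD_zero]
        cases rest <;> simp
      simp [hhead]

-- ===== VERDICT (by name: the statement is the Claim_ definition above) =====
theorem align_sentences_with_sc_tags_spec : Claim_equal_align_sentences_with_sc_tags := by
  intro l _
  unfold Spec_align_sentences_with_sc_tags align_sentences_with_sc_tags align_sentences_with_sc_tags_alt
  rw [pvGoB_eq]
  have := pvA_inv l l [] [] [] true (by simp)
  simpa using this
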